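-- pv_equiv track=rewrite | github.com/Basim-23/Flux-DFT | src/fluxdft/intelligence/errors/decoder.py | _extract_error_section
-- ===== SOURCE A (Python) =====
-- def _extract_error_section(output: str, context_lines: int = 10) -> str:
--     """Extract the relevant error context from full output."""
--     lines = output.split('\n')
--
--     # Find lines containing error keywords
--     error_keywords = ['error', 'crash', 'abort', 'fail', 'stop']
--     error_indices = [
--         i for i, line in enumerate(lines)
--         if any(kw in line.lower() for kw in error_keywords)
--     ]
--
--     if error_indices:
--         # Get context around first error
--         start = max(0, error_indices[0] - context_lines)
--         end = min(len(lines), error_indices[-1] + context_lines)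
--         return '\n'.join(lines[start:end])
--
--     # No obvious error - return last portion
--     return '\n'.join(lines[-30:]) if len(lines) > 30 else output
-- ===== SOURCE B (Python) =====
-- def _extract_error_section(output: str, context_lines: int = 10) -> str:
--     """Extract the relevant error context from full output."""
--     lines = output.split('\n')
--     keywords = ('error', 'crash', 'abort', 'fail', 'stop')
--
--     def hit(line):
--         low = line.lower()
--         return any(kw in low for kw in keywords)
--
--     first = None
--     for i, line in enumerate(lines):
--         if hit(line):
--             first = i
--             break
--
--     if first is None:
--         return '\n'.join(lines[-30:]) if len(lines) > 30 else output
--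
--     last = first
--     for i, line in reversed(list(enumerate(lines))):
--         if hit(line):
--             last = i
--             break
--
--     start = max(0, first - context_lines)
--     end = min(len(lines), last + context_lines)
--     return '\n'.join(lines[start:end])
-- ===== Notes on version B (the rewrite author's own statement) =====
-- stated objective: alternative
-- what changed: B never builds the list of all matching line indices: it finds the first match with an early-exit forward scan and the last match with an early-exit backward scan over the reversed enumeration, then slices once.
import Mathlib
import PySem

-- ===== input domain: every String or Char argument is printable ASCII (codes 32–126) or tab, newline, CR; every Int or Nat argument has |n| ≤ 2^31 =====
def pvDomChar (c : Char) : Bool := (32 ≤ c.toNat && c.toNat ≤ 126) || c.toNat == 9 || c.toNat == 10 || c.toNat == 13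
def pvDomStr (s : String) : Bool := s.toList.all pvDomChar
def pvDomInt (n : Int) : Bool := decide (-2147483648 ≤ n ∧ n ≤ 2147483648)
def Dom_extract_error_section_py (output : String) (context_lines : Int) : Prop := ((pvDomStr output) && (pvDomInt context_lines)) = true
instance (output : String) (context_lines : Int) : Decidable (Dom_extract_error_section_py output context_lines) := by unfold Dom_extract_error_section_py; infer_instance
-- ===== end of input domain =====

-- B replaces A's list of all matching indices by two early-exit directional scans (forward for the first match, backward over the reversed enumeration for the last); same cost class, no index list built.

-- ===== PORT A =====
-- lines = output.split('\n'); split? is none only for sep = "", and the sep here is the literal "\n", so getD [] is exact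
def eesLines (output : String) : List String := (PySem.Str.split? output "\n").getD []

-- any(kw in line.lower() for kw in error_keywords)
def eesMatchA (line : String) : Bool :=
  (["error", "crash", "abort", "fail", "stop"]).any
    (fun kw => PySem.Str.isIn kw (PySem.Str.lower line))

def extract_error_section_py (output : String) (context_lines : Int) : String :=
  let lines := eesLines output
  -- error_indices = [i for i, line in enumerate(lines) if any(...)]
  let error_indices := ((PySem.List.enumerate lines 0).filter (fun p => eesMatchA p.2)).map Prod.fst
  if error_indices ≠ [] then
    let start := max 0 (PySem.List.pyGetD error_indices 0 0 - context_lines)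
    let stop := min (lines.length : Int) (PySem.List.pyGetD error_indices (-1) 0 + context_lines)
    PySem.Str.join "\n" (PySem.List.slice lines (some start) (some stop))
  else
    if (lines.length : Int) > 30 then
      PySem.Str.join "\n" (PySem.List.slice lines (some (-30)) none)
    else output

-- ===== PORT B =====
def eesHit (line : String) : Bool :=
  (["error", "crash", "abort", "fail", "stop"]).any
    (fun kw => PySem.Str.isIn kw (PySem.Str.lower line))

-- 'for i, line in enumerate(lines): if hit(line): first = i; break'
def eesFirst : List (Int × String) → Option Int
  | [] => none
  | (i, l) :: t => if eesHit l then some i else eesFirst t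

-- 'for i, line in reversed(list(enumerate(lines))): if hit(line): last = i; break' (last initialised to first)
def eesLast : List (Int × String) → Int → Int
  | [], dflt => dflt
  | (i, l) :: t, dflt => if eesHit l then i else eesLast t dflt

def extract_error_section_py_alt (output : String) (context_lines : Int) : String :=
  let lines := eesLines output
  match eesFirst (PySem.List.enumerate lines 0) with
  | none =>
    if (lines.length : Int) > 30 then
      PySem.Str.join "\n" (PySem.List.slice lines (some (-30)) none)
    else output
  | some first =>
    let last := eesLast ((PySem.List.enumerate lines 0).reverse) first
    let start := max 0 (first - context_lines)
    let stop := min (lines.length : Int) (last + context_lines)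
    PySem.Str.join "\n" (PySem.List.slice lines (some start) (some stop))

-- ===== PRECONDITION & SPEC =====
def Spec_extract_error_section_py (output : String) (context_lines : Int) (out : String) : Prop := out = extract_error_section_py_alt output context_lines
instance (output : String) (context_lines : Int) (out : String) : Decidable (Spec_extract_error_section_py output context_lines out) := by unfold Spec_extract_error_section_py; infer_instance

-- ===== CLAIM (what is proved, stated in full; the proofs are below) =====
def Claim_equal_extract_error_section_py : Prop := ∀ (output : String) (context_lines : Int), Dom_extract_error_section_py output context_lines → Spec_extract_error_section_py output context_lines (extract_error_section_py output context_lines)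

-- ===== LEMMAS AND PROOFS =====

theorem eesHit_eq (l : String) : eesHit l = eesMatchA l := rfl

theorem eesFirst_eq_head? (e : List (Int × String)) :
    eesFirst e = ((e.filter (fun p => eesMatchA p.2)).map Prod.fst).head? := by
  induction e with
  | nil => rfl
  | cons p t ih =>
    obtain ⟨i, l⟩ := p
    by_cases h : eesMatchA l
    · simp [eesFirst, eesHit_eq, h]
    · simp [eesFirst, eesHit_eq, h, ih]

theorem eesLast_eq_head? (e : List (Int × String)) (d : Int) :
    eesLast e d = (((e.filter (fun p => eesMatchA p.2)).map Prod.fst).head?).getD d := by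
  induction e with
  | nil => rfl
  | cons p t ih =>
    obtain ⟨i, l⟩ := p
    by_cases h : eesMatchA l
    · simp [eesLast, eesHit_eq, h]
    · simp [eesLast, eesHit_eq, h, ih]

theorem eesLast_reverse (e : List (Int × String)) (d : Int) :
    eesLast e.reverse d = (((e.filter (fun p => eesMatchA p.2)).map Prod.fst).getLast?).getD d := by
  rw [eesLast_eq_head?, List.filter_reverse, List.map_reverse, List.head?_reverse]

theorem pyGetD_neg_one_getLast (xs : List Int) (h : xs ≠ []) :
    PySem.List.pyGetD xs (-1) 0 = xs.getLast?.getD 0 := by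
  have hlen : 0 < xs.length := List.length_pos_iff.mpr h
  rw [PySem.List.pyGetD_neg_ofNat xs 1 0 (by omega) (by omega)]
  rw [List.getLast?_eq_getElem?]
  simp [List.getElem?_eq_getElem (by omega : xs.length - 1 < xs.length)]

-- ===== VERDICT (by name: the statement is the Claim_ definition above) =====
theorem extract_error_section_py_spec : Claim_equal_extract_error_section_py := by
  intro output context_lines _
  unfold Spec_extract_error_section_py extract_error_section_py extract_error_section_py_alt
  simp only [eesFirst_eq_head?, eesLast_reverse]
  cases hidx : (List.map Prod.fst (List.filter (fun p => eesMatchA p.2)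
      (PySem.List.enumerate (eesLines output) 0))) with
  | nil => simp
  | cons a t =>
    cases hg : (a :: t).getLast? with
    | none => exact absurd (List.getLast?_eq_none_iff.mp hg) (by simp)
    | some v =>
      have h1 : PySem.List.pyGetD (a :: t) 0 0 = a := by
        simp [PySem.List.pyGetD, PySem.List.pyGet?, PySem.List.pyIdx?]
      have h2 : PySem.List.pyGetD (a :: t) (-1) 0 = (a :: t).getLast?.getD 0 :=
        pyGetD_neg_one_getLast _ (by simp)
      simp [h1, h2, hg]
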